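-- pv_equiv track=rewrite | github.com/alicewhatnot/Bad-Code | A-Level Programming Challenges/29 Item Merge.py | createUniqueList
-- ===== SOURCE A (Python) =====
-- def createUniqueList(list1,list2):
--     temp1 = list1[:]
--     temp2 = list2[:]
--
--     if len(temp1) >= len(temp2):
--         shortList = temp2
--         longList = temp1
--     else:
--         shortList = temp1
--         longList = temp2
--
--     for i in range(len(shortList) - 1, -1, -1):
--         for j in range(len(longList) - 1, -1, -1):
--             if shortList[i] == longList[j]:
--                 longList.pop(j)
--                 shortList.pop(i)
--                 break
--
--     uniqueList = temp1 + temp2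
--     return uniqueList
-- ===== SOURCE B (Python) =====
-- def createUniqueList(list1, list2):
--     def counts(lst):
--         c = {}
--         for x in lst:
--             c[x] = c.get(x, 0) + 1
--         return c
--
--     def survivors(lst, own, other):
--         budget = {v: n - min(n, other.get(v, 0)) for v, n in own.items()}
--         out = []
--         for x in lst:
--             if budget[x] > 0:
--                 out.append(x)
--                 budget[x] -= 1
--         return out
--
--     c1 = counts(list1)
--     c2 = counts(list2)
--     return survivors(list1, c1, c2) + survivors(list2, c2, c1)
-- ===== Notes on version B (the rewrite author's own statement) =====
-- stated objective: faster
-- what changed: A repeatedly scans the long list from the back and pops matched pairs in place (nested loops); B counts each value's occurrences in both lists once and then keeps, in a single left-to-right pass per list, each value's first (own count - overlap) occurrences.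
import Mathlib
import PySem

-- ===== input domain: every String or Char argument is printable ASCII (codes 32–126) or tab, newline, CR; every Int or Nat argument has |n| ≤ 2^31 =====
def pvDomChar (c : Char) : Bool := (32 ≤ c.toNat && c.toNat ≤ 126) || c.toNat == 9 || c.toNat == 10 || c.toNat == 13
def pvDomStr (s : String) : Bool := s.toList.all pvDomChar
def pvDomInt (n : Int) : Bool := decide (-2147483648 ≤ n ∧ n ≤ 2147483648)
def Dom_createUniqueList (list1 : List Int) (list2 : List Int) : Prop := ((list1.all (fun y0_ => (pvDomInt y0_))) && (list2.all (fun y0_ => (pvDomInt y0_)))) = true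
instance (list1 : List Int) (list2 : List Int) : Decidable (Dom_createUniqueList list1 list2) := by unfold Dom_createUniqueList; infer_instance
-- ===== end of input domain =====

-- B replaces A's quadratic nested pop-scan by counting overlaps per value and one
-- filtering pass per list (objective: faster, asymptotic). Return-value equivalence only:
-- A mutates its local copies, not the caller's lists.

-- ===== PORT A =====
-- inner loop: for j in range(len(longList)-1, -1, -1): if v == longList[j]: pop j; break
def pvPopLastAux (v : Int) (l : List Int) : Nat → Option (List Int)
  | 0 => none
  | j + 1 =>
    match l[j]? with
    | some w => if w = v then some (l.eraseIdx j) else pvPopLastAux v l j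
    | none => pvPopLastAux v l j

-- outer loop: for i in range(len(shortList)-1, -1, -1), popping matched pairs
def pvALoop : Nat → List Int → List Int → List Int × List Int
  | 0, s, l => (s, l)
  | i + 1, s, l =>
    match s[i]? with
    | some v =>
      match pvPopLastAux v l l.length with
      | some l' => pvALoop i (s.eraseIdx i) l'
      | none => pvALoop i s l
    | none => pvALoop i s l

def createUniqueList (list1 : List Int) (list2 : List Int) : List Int :=
  if list2.length ≤ list1.length then
    -- shortList = temp2, longList = temp1; result is temp1 + temp2
    let r := pvALoop list2.length list2 list1
    r.2 ++ r.1
  else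
    let r := pvALoop list1.length list1 list2
    r.1 ++ r.2

-- ===== PORT B =====
-- counts(lst): c[x] = c.get(x, 0) + 1
def pvCounts (lst : List Int) : PySem.Dict Int Int :=
  lst.foldl (fun c x => c.insert x (c.getD x 0 + 1)) PySem.Dict.empty

-- survivors(lst, own, other): budget dict, then one pass keeping while budget[x] > 0
-- (budget[x] is ported as getD _ 0: x ∈ lst always has a key in budget, so this is exact)
def pvSurvivors (lst : List Int) (own other : PySem.Dict Int Int) : List Int :=
  let budget := own.items.foldl
    (fun b p => b.insert p.1 (p.2 - min p.2 (other.getD p.1 0))) PySem.Dict.empty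
  (lst.foldl
    (fun (acc : List Int × PySem.Dict Int Int) x =>
      if 0 < acc.2.getD x 0 then (acc.1 ++ [x], acc.2.insert x (acc.2.getD x 0 - 1)) else acc)
    ([], budget)).1

def createUniqueList_alt (list1 : List Int) (list2 : List Int) : List Int :=
  let c1 := pvCounts list1
  let c2 := pvCounts list2
  pvSurvivors list1 c1 c2 ++ pvSurvivors list2 c2 c1

-- ===== PRECONDITION & SPEC =====
def Spec_createUniqueList (list1 : List Int) (list2 : List Int) (out : List Int) : Prop := out = createUniqueList_alt list1 list2
instance (list1 : List Int) (list2 : List Int) (out : List Int) : Decidable (Spec_createUniqueList list1 list2 out) := by unfold Spec_createUniqueList; infer_instance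

-- ===== CLAIM (what is proved, stated in full; the proofs are below) =====
def Claim_equal_createUniqueList : Prop := ∀ (list1 : List Int) (list2 : List Int), Dom_createUniqueList list1 list2 → Spec_createUniqueList list1 list2 (createUniqueList list1 list2)

-- ===== LEMMAS AND PROOFS =====

-- keep the first (budget f) occurrences of each value, left to right
def pvKeepF : List Int → (Int → Nat) → List Int
  | [], _ => []
  | x :: xs, f =>
    if 0 < f x then x :: pvKeepF xs (fun w => if w = x then f w - 1 else f w)
    else pvKeepF xs f

-- drop the first (budget f) occurrences of each value, left to right
def pvDropB : List Int → (Int → Nat) → List Int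
  | [], _ => []
  | x :: xs, f =>
    if 0 < f x then pvDropB xs (fun w => if w = x then f w - 1 else f w)
    else x :: pvDropB xs f

theorem pvDropB_zero (xs : List Int) : pvDropB xs (fun _ => 0) = xs := by
  induction xs with
  | nil => rfl
  | cons x xs ih => simp [pvDropB, ih]

theorem pvDropB_congr (xs : List Int) (b b' : Int → Nat)
    (h : ∀ w ∈ xs, b w = b' w) : pvDropB xs b = pvDropB xs b' := by
  induction xs generalizing b b' with
  | nil => rfl
  | cons x xs ih =>
    have hx : b x = b' x := h x (by simp)
    simp only [pvDropB, hx]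
    split
    · apply ih
      intro w hw
      by_cases hwx : w = x
      · subst hwx; simp [hx]
      · simp only [if_neg hwx]; exact h w (by simp [hw])
    · rw [ih _ _ (fun w hw => h w (by simp [hw]))]

-- removing an occurrence of v from the scanned list = one more unit of budget for v
theorem pvDropB_erase (v : Int) (xs : List Int) (b : Int → Nat) (hv : v ∈ xs) :
    pvDropB (xs.erase v) b = pvDropB xs (fun w => if w = v then b v + 1 else b w) := by
  induction xs generalizing b with
  | nil => cases hv
  | cons x xs ih =>
    by_cases hxv : x = v
    · subst hxv
      rw [List.erase_cons_head]
      simp only [pvDropB, Nat.succ_pos, if_pos]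
      apply pvDropB_congr
      intro w _
      by_cases hwx : w = x <;> simp [hwx]
    · rw [List.erase_cons_tail (by simp [Ne.symm, hxv])]
      have hv' : v ∈ xs := by
        cases hv with
        | head => exact absurd rfl hxv
        | tail _ h => exact h
      simp only [pvDropB, if_neg hxv]
      split
      · rw [ih _ hv']
        apply pvDropB_congr
        intro w _
        by_cases hwv : w = v <;> by_cases hwx : w = x <;> simp_all
      · rw [ih _ hv']

-- splitting a keep pass: the second half runs on the leftover budget
theorem pvKeepF_append (ys zs : List Int) (b : Int → Nat) :
    pvKeepF (ys ++ zs) b = pvKeepF ys b ++ pvKeepF zs (fun w => b w - ys.count w) := by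
  induction ys generalizing b with
  | nil => simp [pvKeepF]
  | cons x ys ih =>
    simp only [List.cons_append, pvKeepF]
    by_cases hbx : 0 < b x
    · simp only [if_pos hbx, ih, List.cons_append]
      have h1 : (fun w => (if w = x then b w - 1 else b w) - ys.count w)
          = (fun w => b w - (x :: ys).count w) := by
        funext w
        by_cases hwx : w = x
        · subst hwx; rw [if_pos rfl, List.count_cons_self]; omega
        · have hxw : (x == w) = false := beq_eq_false_iff_ne.mpr (Ne.symm hwx)
          rw [if_neg hwx, List.count_cons, hxw]
          simp
      rw [h1]
    · have hb0 : b x = 0 := by omega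
      simp only [if_neg hbx, ih]
      have h1 : (fun w => b w - ys.count w) = (fun w => b w - (x :: ys).count w) := by
        funext w
        by_cases hwx : w = x
        · subst hwx; rw [List.count_cons_self, hb0]; omega
        · have hxw : (x == w) = false := beq_eq_false_iff_ne.mpr (Ne.symm hwx)
          rw [List.count_cons, hxw]
          simp
      rw [h1]

theorem pvKeepF_congr (xs : List Int) (b b' : Int → Nat)
    (h : ∀ w, min (b w) (xs.count w) = min (b' w) (xs.count w)) :
    pvKeepF xs b = pvKeepF xs b' := by
  induction xs generalizing b b' with
  | nil => rfl
  | cons x xs ih =>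
    have hx := h x
    simp only [List.count_cons_self] at hx
    have hpos : 0 < b x ↔ 0 < b' x := by omega
    simp only [pvKeepF]
    by_cases hb : 0 < b x
    · rw [if_pos hb, if_pos (hpos.mp hb)]
      congr 1
      apply ih
      intro w
      by_cases hwx : w = x
      · subst hwx; rw [if_pos rfl, if_pos rfl]; omega
      · rw [if_neg hwx, if_neg hwx]
        have := h w
        have hxw : (x == w) = false := beq_eq_false_iff_ne.mpr (Ne.symm hwx)
        simp only [List.count_cons, hxw] at this
        exact this
    · rw [if_neg hb, if_neg (fun h' => hb (hpos.mpr h'))]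
      apply ih
      intro w
      by_cases hwx : w = x
      · subst hwx; omega
      · have := h w
        have hxw : (x == w) = false := beq_eq_false_iff_ne.mpr (Ne.symm hwx)
        simp only [List.count_cons, hxw] at this
        exact this

-- bridge: dropping the last (min) occurrences = keeping the first (count - budget)
theorem pvDropB_rev (r : List Int) (k : Int → Nat) :
    (pvDropB r k).reverse = pvKeepF r.reverse (fun v => r.reverse.count v - k v) := by
  induction r generalizing k with
  | nil => rfl
  | cons x rest ih =>
    rw [List.reverse_cons, pvKeepF_append]
    have hc : (rest.reverse ++ [x]).count x = rest.reverse.count x + 1 := by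
      rw [List.count_append]; simp
    have hc' : ∀ w, w ≠ x → (rest.reverse ++ [x]).count w = rest.reverse.count w := by
      intro w hwx
      rw [List.count_append]
      simp [Ne.symm hwx]
    simp only [pvDropB]
    by_cases hk : 0 < k x
    · rw [if_pos hk, ih]
      have h1 : (fun v => rest.reverse.count v - (if v = x then k v - 1 else k v))
          = (fun v => (rest.reverse ++ [x]).count v - k v) := by
        funext w
        by_cases hwx : w = x
        · subst hwx; rw [if_pos rfl, hc]; omega
        · rw [if_neg hwx, hc' w hwx]
      have h2 : pvKeepF [x] (fun w => (rest.reverse ++ [x]).count w - k w - rest.reverse.count w) = [] := by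
        simp only [pvKeepF]
        rw [if_neg (by rw [hc]; omega)]
      rw [h2, List.append_nil, ← h1]
    · rw [if_neg hk, List.reverse_cons, ih]
      have hk0 : k x = 0 := by omega
      have h1 : pvKeepF rest.reverse (fun v => rest.reverse.count v - k v)
          = pvKeepF rest.reverse (fun v => (rest.reverse ++ [x]).count v - k v) := by
        apply pvKeepF_congr
        intro w
        by_cases hwx : w = x
        · subst hwx; rw [hc, hk0]; omega
        · rw [hc' w hwx]
      have h2 : pvKeepF [x] (fun w => (rest.reverse ++ [x]).count w - k w - rest.reverse.count w) = [x] := by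
        simp only [pvKeepF]
        rw [if_pos (by rw [hc, hk0]; omega)]
      rw [h2, ← h1]

-- bridge: dropping the last (min) occurrences = keeping the first (count - budget)
theorem pvDropB_reverse_eq_keepF (l : List Int) (k : Int → Nat) :
    (pvDropB l.reverse k).reverse = pvKeepF l (fun v => l.count v - k v) := by
  rw [pvDropB_rev, List.reverse_reverse]

-- characterization of A's inner scan: it removes the last occurrence of v
theorem pvPopLastAux_spec (v : Int) (l : List Int) (j : Nat) (hj : j ≤ l.length) :
    pvPopLastAux v l j =
      if v ∈ l.take j then some (((l.take j).reverse.erase v).reverse ++ l.drop j) else none := by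
  induction j with
  | zero => simp [pvPopLastAux]
  | succ j ih =>
    have hjl : j < l.length := hj
    have hget : l[j]? = some l[j] := by simp [hjl]
    have htake : l.take (j + 1) = l.take j ++ [l[j]] := by
      rw [List.take_add_one, hget]; rfl
    have hdrop : l.drop j = l[j] :: l.drop (j + 1) := List.drop_eq_getElem_cons hjl
    simp only [pvPopLastAux, hget]
    by_cases hv : l[j] = v
    · rw [if_pos hv, htake]
      have hm : v ∈ l.take j ++ [l[j]] :=
        List.mem_append_right _ (by rw [List.mem_singleton]; exact hv.symm)
      rw [if_pos hm, List.eraseIdx_eq_take_drop_succ]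
      congr 1
      rw [List.reverse_append, List.reverse_singleton, List.singleton_append, hv,
        List.erase_cons_head, List.reverse_reverse]
    · rw [if_neg hv, ih (Nat.le_of_lt hjl), htake]
      by_cases hmem : v ∈ l.take j
      · have hm : v ∈ l.take j ++ [l[j]] := List.mem_append_left _ hmem
        rw [if_pos hmem, if_pos hm]
        congr 1
        rw [List.reverse_append, List.reverse_singleton, List.singleton_append,
          List.erase_cons_tail (by simp [hv]), List.reverse_cons, List.append_assoc,
          List.singleton_append, ← hdrop]
      · have hm : ¬ v ∈ l.take j ++ [l[j]] := by
          rw [List.mem_append, List.mem_singleton]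
          rintro (h | h)
          · exact hmem h
          · exact hv h.symm
        rw [if_neg hmem, if_neg hm]

-- characterization of A's outer loop on the processed prefix
theorem pvALoop_spec (i : Nat) (s l : List Int) (hi : i ≤ s.length) :
    pvALoop i s l =
      ((pvDropB (s.take i).reverse (fun v => l.count v)).reverse ++ s.drop i,
       (pvDropB l.reverse (fun v => (s.take i).count v)).reverse) := by
  induction i generalizing s l with
  | zero =>
    simp only [pvALoop, List.take_zero, List.reverse_nil, pvDropB, List.drop_zero,
      List.nil_append]
    have : (fun v => List.count v ([] : List Int)) = (fun _ : Int => 0) := by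
      funext v; simp
    rw [this, pvDropB_zero, List.reverse_reverse]
  | succ i ih =>
    have hil : i < s.length := hi
    have hget : s[i]? = some s[i] := by simp [hil]
    have htake : s.take (i + 1) = s.take i ++ [s[i]] := by
      rw [List.take_add_one, hget]; rfl
    have hdrop : s.drop i = s[i] :: s.drop (i + 1) := List.drop_eq_getElem_cons hil
    simp only [pvALoop, hget]
    rw [pvPopLastAux_spec s[i] l l.length (le_refl _), List.take_length, List.drop_length,
      List.append_nil]
    by_cases hmem : s[i] ∈ l
    · rw [if_pos hmem]
      dsimp only
      have hlen : i ≤ (s.eraseIdx i).length := by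
        rw [List.length_eraseIdx_of_lt hil]; omega
      rw [ih _ _ hlen]
      have hlt : (s.take i).length = i := by
        rw [List.length_take]; omega
      have htke : (s.eraseIdx i).take i = s.take i := by
        rw [List.eraseIdx_eq_take_drop_succ]; exact List.take_left' hlt
      have hdre : (s.eraseIdx i).drop i = s.drop (i + 1) := by
        rw [List.eraseIdx_eq_take_drop_succ]; exact List.drop_left' hlt
      have hcount : (fun v => ((l.reverse.erase s[i]).reverse).count v)
          = (fun v => if v = s[i] then l.count v - 1 else l.count v) := by
        funext v
        rw [List.count_reverse, List.count_erase, List.count_reverse]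
        by_cases hv : v = s[i]
        · simp [hv]
        · simp [hv, Ne.symm hv]
      rw [Prod.mk.injEq]
      refine ⟨?_, ?_⟩
      · rw [htke, hdre, hcount, htake, List.reverse_append, List.reverse_singleton,
          List.singleton_append]
        simp only [pvDropB]
        rw [if_pos (List.count_pos_iff.mpr hmem)]
      · rw [htke, List.reverse_reverse,
          pvDropB_erase s[i] l.reverse _ (by rwa [List.mem_reverse])]
        congr 1
        apply pvDropB_congr
        intro w _
        rw [htake]
        by_cases hw : w = s[i]
        · subst hw
          rw [if_pos rfl, List.count_append]
          simp
        · rw [if_neg hw, List.count_append]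
          simp [Ne.symm hw]
    · rw [if_neg hmem]
      dsimp only
      rw [ih _ _ (Nat.le_of_lt hil)]
      have hcnt0 : List.count s[i] l = 0 := List.count_eq_zero.mpr hmem
      rw [Prod.mk.injEq]
      refine ⟨?_, ?_⟩
      · rw [htake, List.reverse_append, List.reverse_singleton, List.singleton_append]
        simp only [pvDropB]
        rw [if_neg (by simp [hcnt0]), List.reverse_cons, List.append_assoc,
          List.singleton_append, ← hdrop]
      · apply congrArg
        apply pvDropB_congr
        intro w hw
        rw [htake, List.count_append]
        by_cases hws : w = s[i]
        · subst hws
          exact absurd (List.mem_reverse.mp hw) hmem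
        · simp [Ne.symm hws]

-- A's whole computation, in closed form
theorem createUniqueList_eq (list1 list2 : List Int) :
    createUniqueList list1 list2 =
      (pvDropB list1.reverse (fun v => list2.count v)).reverse ++
      (pvDropB list2.reverse (fun v => list1.count v)).reverse := by
  unfold createUniqueList
  split
  · rw [pvALoop_spec list2.length list2 list1 (le_refl _)]
    simp
  · rw [pvALoop_spec list1.length list1 list2 (le_refl _)]
    simp

-- B side: the counts dict really counts
theorem pvCounts_getD (lst : List Int) (v : Int) :
    (pvCounts lst).getD v 0 = (lst.count v : Int) := by
  unfold pvCounts
  rw [PySem.Dict.foldl_insert_getD_add_one_eq_counter, PySem.Dict.getD_counter]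

-- getD after a fold of key-determined inserts
theorem pvFoldInsert_getD (ks : List Int) (G : Int → Int) (b0 : PySem.Dict Int Int) (v : Int) :
    (ks.foldl (fun b k => b.insert k (G k)) b0).getD v 0 =
      if v ∈ ks then G v else b0.getD v 0 := by
  induction ks generalizing b0 with
  | nil => simp
  | cons k ks ih =>
    simp only [List.foldl_cons, ih, List.mem_cons]
    by_cases hv : v ∈ ks
    · simp [hv]
    · by_cases hvk : v = k <;> simp [hv, hvk, PySem.Dict.getD_insert]

-- the survivors pass is pvKeepF on the budget function
theorem pvSurvivorsLoop_eq (lst : List Int) (acc : List Int) (b : PySem.Dict Int Int)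
    (f : Int → Nat) (hb : ∀ v, b.getD v 0 = (f v : Int)) :
    (lst.foldl
      (fun (acc : List Int × PySem.Dict Int Int) x =>
        if 0 < acc.2.getD x 0 then (acc.1 ++ [x], acc.2.insert x (acc.2.getD x 0 - 1)) else acc)
      (acc, b)).1 = acc ++ pvKeepF lst f := by
  induction lst generalizing acc b f with
  | nil => simp [pvKeepF]
  | cons x xs ih =>
    simp only [List.foldl_cons, pvKeepF]
    by_cases hx : 0 < f x
    · rw [if_pos (show (0:Int) < b.getD x 0 by rw [hb x]; exact_mod_cast hx), if_pos hx]
      rw [ih _ _ (fun w => if w = x then f w - 1 else f w)]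
      · simp
      · intro v
        rw [PySem.Dict.getD_insert]
        by_cases hvx : v = x
        · subst hvx; rw [if_pos rfl, if_pos rfl, hb v]; omega
        · rw [if_neg hvx, if_neg hvx, hb v]
    · rw [if_neg (show ¬ (0:Int) < b.getD x 0 by rw [hb x]; omega), if_neg hx]
      rw [ih _ _ f hb]

theorem pvSurvivors_eq (lst other : List Int) :
    pvSurvivors lst (pvCounts lst) (pvCounts other) =
      pvKeepF lst (fun v => lst.count v - other.count v) := by
  unfold pvSurvivors
  rw [pvSurvivorsLoop_eq lst [] _ (fun v => lst.count v - other.count v)]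
  · simp
  · intro v
    have hitems : (pvCounts lst).items
        = (PySem.Set.ofList lst).map (fun k => (k, (lst.count k : Int))) := by
      unfold pvCounts
      rw [PySem.Dict.foldl_insert_getD_add_one_eq_counter, PySem.Dict.items_counter]
    rw [hitems, List.foldl_map]
    rw [show (fun (b : PySem.Dict Int Int) (k : Int) =>
          b.insert (k, (lst.count k : Int)).1
            ((k, (lst.count k : Int)).2 - min (k, (lst.count k : Int)).2
              ((pvCounts other).getD (k, (lst.count k : Int)).1 0)))
        = (fun (b : PySem.Dict Int Int) (k : Int) =>
          b.insert k ((lst.count k : Int) - min (lst.count k : Int) ((other.count k : Int)))) by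
      funext b k
      rw [pvCounts_getD]]
    rw [pvFoldInsert_getD]
    by_cases hv : v ∈ lst
    · rw [if_pos (by rwa [PySem.Set.mem_ofList])]
      omega
    · rw [if_neg (by rwa [PySem.Set.mem_ofList])]
      have : lst.count v = 0 := List.count_eq_zero.mpr hv
      simp [this, PySem.Dict.getD_empty]

-- ===== VERDICT (by name: the statement is the Claim_ definition above) =====
theorem createUniqueList_spec : Claim_equal_createUniqueList := by
  intro list1 list2 _
  unfold Spec_createUniqueList
  show _ = createUniqueList_alt list1 list2
  have halt : createUniqueList_alt list1 list2
      = pvSurvivors list1 (pvCounts list1) (pvCounts list2)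
        ++ pvSurvivors list2 (pvCounts list2) (pvCounts list1) := rfl
  rw [halt, createUniqueList_eq, pvSurvivors_eq, pvSurvivors_eq,
    pvDropB_reverse_eq_keepF, pvDropB_reverse_eq_keepF]
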